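-- pv_equiv track=rewrite | github.com/alexandraback/datacollection | solutions_5686313294495744_0/Python/Ranmocy/third.py | solve
-- ===== SOURCE A (Python) =====
-- def solve(N, lists):
--     first = {}
--     second = {}
--     fakes = []
--     for l in lists:
--         t = l[0]
--         if t not in first:
--             first[t] = 0
--         first[t] += 1
--         t = l[1]
--         if t not in second:
--             second[t] = 0
--         second[t] += 1
--         fakes.append(l)
--     real = 0
--     for l in lists:
--         if first[l[0]] == 1 or second[l[1]] == 1:
--             real += 1
--             fakes.remove(l)
--     fake = 0 # fake for sure
--     while len(fakes) > 0:
--         f = fakes.pop()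
--         fake += 1
--         first[f[0]] -= 1
--         second[f[1]] -= 1
--         for t in list(fakes):
--             if first[t[0]] == 1 or second[t[1]] == 1:
--                 real += 1
--                 fakes.remove(t)
--     return len(lists) - real
-- ===== SOURCE B (Python) =====
-- def solve(N, lists):
--     c1 = {}
--     c2 = {}
--     for l in lists:
--         c1[l[0]] = c1.get(l[0], 0) + 1
--         c2[l[1]] = c2.get(l[1], 0) + 1
--     fake = 0
--     for l in reversed(lists):
--         if c1[l[0]] != 1 and c2[l[1]] != 1:
--             fake += 1
--             c1[l[0]] -= 1
--             c2[l[1]] -= 1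
--     return fake
-- ===== Notes on version B (the rewrite author's own statement) =====
-- stated objective: faster
-- what changed: Replaces the quadratic peeling (pop the last fake, then rescan and remove every entry whose coordinate count became 1) by a single reverse pass: a coordinate count that reaches 1 can never change again, so an entry is real exactly when one of its counts is 1 at its own turn of the reverse scan.
import Mathlib
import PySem

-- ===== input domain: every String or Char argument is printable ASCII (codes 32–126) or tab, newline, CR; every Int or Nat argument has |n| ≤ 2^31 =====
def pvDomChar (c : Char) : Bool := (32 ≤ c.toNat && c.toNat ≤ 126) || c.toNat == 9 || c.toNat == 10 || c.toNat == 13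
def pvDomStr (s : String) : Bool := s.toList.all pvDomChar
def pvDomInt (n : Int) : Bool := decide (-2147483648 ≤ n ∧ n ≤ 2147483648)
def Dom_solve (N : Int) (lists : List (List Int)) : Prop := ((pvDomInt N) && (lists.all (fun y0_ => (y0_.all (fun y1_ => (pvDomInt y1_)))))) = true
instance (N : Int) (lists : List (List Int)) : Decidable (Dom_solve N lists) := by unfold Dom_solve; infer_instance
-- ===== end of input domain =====

-- B replaces A's quadratic pop-and-rescan peeling by a single reverse pass over the
-- entries (a coordinate count that reaches 1 never changes again); equivalence of the
-- RETURN value is proved on all inputs whose inner lists have length ≥ 2 (elsewhere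
-- both Pythons raise IndexError).

-- ===== PORT A =====
-- helper lemma needed by solveWhile's termination
theorem removeGetD_length_le {α : Type} [BEq α] [LawfulBEq α] (s : List α) (t : α) :
    ((PySem.List.remove? s t).getD s).length ≤ s.length := by
  by_cases h : t ∈ s
  · rw [PySem.List.remove?_eq_some_erase s t h]
    simpa using (List.length_erase_le : ((s.erase t).length ≤ s.length))
  · rw [(PySem.List.remove?_eq_none_iff s t).mpr h]
    simp

-- the loop body 'for t in <snapshot>: if first[t[0]] == 1 or second[t[1]] == 1: real += 1; fakes.remove(t)'
-- (this exact code occurs twice in A); state = (real, fakes)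
def scanRemove (first second : PySem.Dict Int Int) :
    List (List Int) → Int × List (List Int) → Int × List (List Int)
  | [], st => st
  | t :: rest, st =>
      scanRemove first second rest
        (if first.getD ((PySem.List.pyGet? t 0).getD 0) 0 = 1 ∨
            second.getD ((PySem.List.pyGet? t 1).getD 0) 0 = 1
         then (st.1 + 1, (PySem.List.remove? st.2 t).getD st.2)
         else st)

theorem scanRemove_length_le (first second : PySem.Dict Int Int) :
    ∀ (xs : List (List Int)) (st : Int × List (List Int)),
      (scanRemove first second xs st).2.length ≤ st.2.length := by
  intro xs
  induction xs with
  | nil => intro st; simp [scanRemove]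
  | cons t rest ih =>
      intro st
      simp only [scanRemove]
      split
      · exact le_trans (ih _) (removeGetD_length_le st.2 t)
      · exact ih st

-- 'while len(fakes) > 0: f = fakes.pop(); fake += 1; first[f[0]] -= 1; second[f[1]] -= 1; <scan>'
def solveWhile (first second : PySem.Dict Int Int) (real fake : Int)
    (fakes : List (List Int)) : Int × Int :=
  if h : fakes = [] then (real, fake)
  else
    let f := fakes.getLast h
    let a := (PySem.List.pyGet? f 0).getD 0
    let b := (PySem.List.pyGet? f 1).getD 0
    let first' := first.insert a (first.getD a 0 - 1)
    let second' := second.insert b (second.getD b 0 - 1)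
    let st := scanRemove first' second' fakes.dropLast (real, fakes.dropLast)
    solveWhile first' second' st.1 (fake + 1) st.2
termination_by fakes.length
decreasing_by
  refine lt_of_le_of_lt (scanRemove_length_le _ _ _ _) ?_
  have h2 : 0 < fakes.length := List.length_pos_of_ne_nil h
  simp only [List.length_dropLast]
  omega

def solve (N : Int) (lists : List (List Int)) : Int :=
  let s := lists.foldl
    (fun (st : PySem.Dict Int Int × PySem.Dict Int Int × List (List Int)) l =>
      let t := (PySem.List.pyGet? l 0).getD 0
      let first := if st.1.contains t then st.1 else st.1.insert t 0
      let first := first.insert t (first.getD t 0 + 1)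
      let u := (PySem.List.pyGet? l 1).getD 0
      let second := if st.2.1.contains u then st.2.1 else st.2.1.insert u 0
      let second := second.insert u (second.getD u 0 + 1)
      (first, second, st.2.2 ++ [l]))
    (PySem.Dict.empty, PySem.Dict.empty, ([] : List (List Int)))
  let st := scanRemove s.1 s.2.1 lists (0, s.2.2)
  (lists.length : Int) - (solveWhile s.1 s.2.1 st.1 0 st.2).1

-- ===== PORT B =====
-- 'for l in reversed(lists): if c1[l[0]] != 1 and c2[l[1]] != 1: fake += 1; c1[l[0]] -= 1; c2[l[1]] -= 1'
def bscan (c1 c2 : PySem.Dict Int Int) (fake : Int) : List (List Int) → Int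
  | [] => fake
  | l :: rest =>
      let a := (PySem.List.pyGet? l 0).getD 0
      let b := (PySem.List.pyGet? l 1).getD 0
      if c1.getD a 0 ≠ 1 ∧ c2.getD b 0 ≠ 1 then
        bscan (c1.insert a (c1.getD a 0 - 1)) (c2.insert b (c2.getD b 0 - 1)) (fake + 1) rest
      else bscan c1 c2 fake rest

def solve_alt (N : Int) (lists : List (List Int)) : Int :=
  let cs := lists.foldl
    (fun (st : PySem.Dict Int Int × PySem.Dict Int Int) l =>
      (st.1.insert ((PySem.List.pyGet? l 0).getD 0)
         (st.1.getD ((PySem.List.pyGet? l 0).getD 0) 0 + 1),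
       st.2.insert ((PySem.List.pyGet? l 1).getD 0)
         (st.2.getD ((PySem.List.pyGet? l 1).getD 0) 0 + 1)))
    (PySem.Dict.empty, PySem.Dict.empty)
  bscan cs.1 cs.2 0 lists.reverse

-- ===== PRECONDITION & SPEC =====
-- Pre_ excludes exactly the inputs with an inner list of length < 2, on which Python A
-- (and Python B alike) raises IndexError at l[0]/l[1].
def Pre_solve (N : Int) (lists : List (List Int)) : Prop := ∀ l ∈ lists, 2 ≤ l.length
instance (N : Int) (lists : List (List Int)) : Decidable (Pre_solve N lists) := by
  unfold Pre_solve; infer_instance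

def pvWitness_solve : Int × List (List Int) := (0, [[1, 2], [1, 3]])

def Spec_solve (N : Int) (lists : List (List Int)) (out : Int) : Prop := out = solve_alt N lists
instance (N : Int) (lists : List (List Int)) (out : Int) : Decidable (Spec_solve N lists out) := by
  unfold Spec_solve; infer_instance

-- ===== CLAIM (what is proved, stated in full; the proofs are below) =====
def Claim_equal_solve : Prop := ∀ (N : Int) (lists : List (List Int)),
  Dom_solve N lists → Pre_solve N lists → Spec_solve N lists (solve N lists)

-- ===== LEMMAS AND PROOFS =====

def f0 (l : List Int) : Int := (PySem.List.pyGet? l 0).getD 0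
def f1 (l : List Int) : Int := (PySem.List.pyGet? l 1).getD 0

-- A's promotion condition as a predicate on the entry
def cnd (d1 d2 : PySem.Dict Int Int) (t : List Int) : Bool :=
  (d1.getD (f0 t) 0 == 1) || (d2.getD (f1 t) 0 == 1)

-- number of entries A pops in its while loop, as a recursion on the already-filtered list
def P (d1 d2 : PySem.Dict Int Int) (fakes : List (List Int)) : Int :=
  if h : fakes = [] then 0
  else
    let f := fakes.getLast h
    let d1' := d1.insert (f0 f) (d1.getD (f0 f) 0 - 1)
    let d2' := d2.insert (f1 f) (d2.getD (f1 f) 0 - 1)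
    1 + P d1' d2' ((fakes.dropLast).filter (fun t => !cnd d1' d2' t))
termination_by fakes.length
decreasing_by
  refine lt_of_le_of_lt (List.length_filter_le _ _) ?_
  have h2 : 0 < fakes.length := List.length_pos_of_ne_nil h
  simp only [List.length_dropLast]
  omega

theorem scanRemove_eq (d1 d2 : PySem.Dict Int Int) :
    ∀ (xs acc : List (List Int)) (real : Int), (∀ y ∈ acc, cnd d1 d2 y = false) →
      scanRemove d1 d2 xs (real, acc ++ xs) =
        (real + (xs.countP (fun t => cnd d1 d2 t) : Int),
         acc ++ xs.filter (fun t => !cnd d1 d2 t)) := by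
  intro xs
  induction xs with
  | nil => intro acc real hacc; simp [scanRemove]
  | cons x rest ih =>
      intro acc real hacc
      simp only [scanRemove]
      by_cases h : cnd d1 d2 x = true
      · have hcond : d1.getD ((PySem.List.pyGet? x 0).getD 0) 0 = 1 ∨
            d2.getD ((PySem.List.pyGet? x 1).getD 0) 0 = 1 := by
          simpa [cnd, f0, f1] using h
        rw [if_pos hcond]
        have hx : x ∉ acc := fun hmem => by
          have := hacc x hmem; rw [this] at h; exact Bool.false_ne_true h
        have hrm : (PySem.List.remove? (acc ++ x :: rest) x).getD (acc ++ x :: rest) = acc ++ rest := by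
          rw [PySem.List.remove?_eq_some_erase _ x (by simp)]
          simp [List.erase_append_right _ hx]
        simp only [hrm]
        rw [ih acc (real + 1) hacc]
        simp only [List.countP_cons, List.filter_cons, h]
        simp only [Prod.mk.injEq]
        refine ⟨by push_cast; ring, by simp⟩
      · rw [if_neg (by simpa [cnd, f0, f1] using h)]
        have hacc' : ∀ y ∈ acc ++ [x], cnd d1 d2 y = false := by
          intro y hy
          rcases List.mem_append.mp hy with hy | hy
          · exact hacc y hy
          · simp only [List.mem_singleton] at hy
            subst hy; simpa using h
        have := ih (acc ++ [x]) real hacc'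
        simp only [List.append_assoc, List.singleton_append] at this
        rw [this]
        simp only [List.countP_cons, List.filter_cons, h]
        simp

theorem solveWhile_eq (d1 d2 : PySem.Dict Int Int) (real fake : Int)
    (fakes : List (List Int)) :
    (solveWhile d1 d2 real fake fakes).1 =
      real + (fakes.length : Int) - P d1 d2 fakes := by
  have H : ∀ n : Nat, ∀ fakes : List (List Int), fakes.length ≤ n →
      ∀ (d1 d2 : PySem.Dict Int Int) (real fake : Int),
      (solveWhile d1 d2 real fake fakes).1 =
        real + (fakes.length : Int) - P d1 d2 fakes := by
    intro n
    induction n with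
    | zero =>
        intro fakes hlen d1 d2 real fake
        have hnil : fakes = [] := List.eq_nil_of_length_eq_zero (by omega)
        subst hnil
        rw [solveWhile, P]
        simp
    | succ n ih =>
        intro fakes hlen d1 d2 real fake
        by_cases h : fakes = []
        · subst h; rw [solveWhile, P]; simp
        · rw [solveWhile, P]
          rw [dif_neg h, dif_neg h]
          simp only []
          set f := fakes.getLast h with hf
          set d1' := d1.insert ((PySem.List.pyGet? f 0).getD 0)
              (d1.getD ((PySem.List.pyGet? f 0).getD 0) 0 - 1) with hd1'
          set d2' := d2.insert ((PySem.List.pyGet? f 1).getD 0)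
              (d2.getD ((PySem.List.pyGet? f 1).getD 0) 0 - 1) with hd2'
          have hscan := scanRemove_eq d1' d2' fakes.dropLast [] real (by simp)
          simp only [List.nil_append] at hscan
          rw [hscan]
          have hdl : fakes.dropLast.length ≤ n := by
            have := List.length_pos_of_ne_nil h
            simp only [List.length_dropLast]; omega
          have hrec := ih (fakes.dropLast.filter (fun t => !cnd d1' d2' t))
            (le_trans (List.length_filter_le _ _) hdl) d1' d2'
            (real + (fakes.dropLast.countP (fun t => cnd d1' d2' t) : Int)) (fake + 1)
          simp only [f0, f1] at hrec ⊢
          rw [← hd1', ← hd2']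
          rw [hrec]
          have hsum : fakes.dropLast.countP (fun t => cnd d1' d2' t) +
              (fakes.dropLast.filter (fun t => !cnd d1' d2' t)).length =
              fakes.dropLast.length := by
            rw [← List.countP_eq_length_filter]
            induction fakes.dropLast with
            | nil => simp
            | cons y ys ihy => by_cases hy : cnd d1' d2' y <;> simp [hy] <;> omega
          have hpos := List.length_pos_of_ne_nil h
          have hlen2 : fakes.dropLast.length = fakes.length - 1 := by
            simp [List.length_dropLast]
          omega
  exact H fakes.length fakes le_rfl d1 d2 real fake

-- the counting dictionaries, as they come out of both build loops
def C1 (lists : List (List Int)) : PySem.Dict Int Int :=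
  lists.foldl (fun d l => d.insert (f0 l) (d.getD (f0 l) 0 + 1)) PySem.Dict.empty
def C2 (lists : List (List Int)) : PySem.Dict Int Int :=
  lists.foldl (fun d l => d.insert (f1 l) (d.getD (f1 l) 0 + 1)) PySem.Dict.empty

theorem buildA_eq (lists : List (List Int)) :
    lists.foldl
      (fun (st : PySem.Dict Int Int × PySem.Dict Int Int × List (List Int)) l =>
        let t := (PySem.List.pyGet? l 0).getD 0
        let first := if st.1.contains t then st.1 else st.1.insert t 0
        let first := first.insert t (first.getD t 0 + 1)
        let u := (PySem.List.pyGet? l 1).getD 0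
        let second := if st.2.1.contains u then st.2.1 else st.2.1.insert u 0
        let second := second.insert u (second.getD u 0 + 1)
        (first, second, st.2.2 ++ [l]))
      (PySem.Dict.empty, PySem.Dict.empty, ([] : List (List Int))) =
    (C1 lists, C2 lists, lists) := by
  have dict_step : ∀ (d : PySem.Dict Int Int) (t : Int),
      ((if d.contains t then d else d.insert t 0).insert t
        ((if d.contains t then d else d.insert t 0).getD t 0 + 1)) =
      d.insert t (d.getD t 0 + 1) := by
    intro d t
    by_cases hc : d.contains t = true
    · simp [hc]
    · rw [if_neg (by simpa using hc)]
      rw [PySem.Dict.getD_insert_self, PySem.Dict.insert_insert_self,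
        PySem.Dict.getD_of_not_contains d 0 (by simpa using hc)]
  have hfun : (fun (st : PySem.Dict Int Int × PySem.Dict Int Int × List (List Int)) l =>
      let t := (PySem.List.pyGet? l 0).getD 0
      let first := if st.1.contains t then st.1 else st.1.insert t 0
      let first := first.insert t (first.getD t 0 + 1)
      let u := (PySem.List.pyGet? l 1).getD 0
      let second := if st.2.1.contains u then st.2.1 else st.2.1.insert u 0
      let second := second.insert u (second.getD u 0 + 1)
      (first, second, st.2.2 ++ [l])) =
      (fun (st : PySem.Dict Int Int × PySem.Dict Int Int × List (List Int)) l =>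
        (st.1.insert (f0 l) (st.1.getD (f0 l) 0 + 1),
         st.2.1.insert (f1 l) (st.2.1.getD (f1 l) 0 + 1),
         st.2.2 ++ [l])) := by
    funext st l
    simp only [dict_step, f0, f1]
  rw [hfun]
  have key : ∀ (ls : List (List Int)) (d1 d2 : PySem.Dict Int Int) (acc : List (List Int)),
      ls.foldl
        (fun (st : PySem.Dict Int Int × PySem.Dict Int Int × List (List Int)) l =>
          (st.1.insert (f0 l) (st.1.getD (f0 l) 0 + 1),
           st.2.1.insert (f1 l) (st.2.1.getD (f1 l) 0 + 1),
           st.2.2 ++ [l])) (d1, d2, acc) =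
      (ls.foldl (fun d l => d.insert (f0 l) (d.getD (f0 l) 0 + 1)) d1,
       ls.foldl (fun d l => d.insert (f1 l) (d.getD (f1 l) 0 + 1)) d2,
       acc ++ ls) := by
    intro ls
    induction ls with
    | nil => intro d1 d2 acc; simp
    | cons l rest ih =>
        intro d1 d2 acc
        simp only [List.foldl_cons]
        rw [ih]
        simp
  rw [key]
  simp [C1, C2]

theorem buildB_eq (lists : List (List Int)) :
    lists.foldl
      (fun (st : PySem.Dict Int Int × PySem.Dict Int Int) l =>
        (st.1.insert ((PySem.List.pyGet? l 0).getD 0)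
           (st.1.getD ((PySem.List.pyGet? l 0).getD 0) 0 + 1),
         st.2.insert ((PySem.List.pyGet? l 1).getD 0)
           (st.2.getD ((PySem.List.pyGet? l 1).getD 0) 0 + 1)))
      (PySem.Dict.empty, PySem.Dict.empty) =
    (C1 lists, C2 lists) := by
  have hfun : (fun (st : PySem.Dict Int Int × PySem.Dict Int Int) l =>
      (st.1.insert ((PySem.List.pyGet? l 0).getD 0)
         (st.1.getD ((PySem.List.pyGet? l 0).getD 0) 0 + 1),
       st.2.insert ((PySem.List.pyGet? l 1).getD 0)
         (st.2.getD ((PySem.List.pyGet? l 1).getD 0) 0 + 1))) =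
      (fun (st : PySem.Dict Int Int × PySem.Dict Int Int) l =>
        (st.1.insert (f0 l) (st.1.getD (f0 l) 0 + 1),
         st.2.insert (f1 l) (st.2.getD (f1 l) 0 + 1))) := by
    funext st l
    simp only [f0, f1]
  rw [hfun]
  have key : ∀ (ls : List (List Int)) (d1 d2 : PySem.Dict Int Int),
      ls.foldl
        (fun (st : PySem.Dict Int Int × PySem.Dict Int Int) l =>
          (st.1.insert (f0 l) (st.1.getD (f0 l) 0 + 1),
           st.2.insert (f1 l) (st.2.getD (f1 l) 0 + 1))) (d1, d2) =
      (ls.foldl (fun d l => d.insert (f0 l) (d.getD (f0 l) 0 + 1)) d1,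
       ls.foldl (fun d l => d.insert (f1 l) (d.getD (f1 l) 0 + 1)) d2) := by
    intro ls
    induction ls with
    | nil => intro d1 d2; simp
    | cons l rest ih => intro d1 d2; simp only [List.foldl_cons]; rw [ih]
  rw [key]
  simp [C1, C2]

-- the invariant: each count dominates the number of unprocessed holders of its value
def InvC (xs : List (List Int)) (d1 d2 : PySem.Dict Int Int) : Prop :=
  ∀ v : Int, ((xs.countP (fun l => f0 l == v) : Int) ≤ d1.getD v 0) ∧
             ((xs.countP (fun l => f1 l == v) : Int) ≤ d2.getD v 0)

theorem f0_def (l : List Int) : (PySem.List.pyGet? l 0).getD 0 = f0 l := rfl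
theorem f1_def (l : List Int) : (PySem.List.pyGet? l 1).getD 0 = f1 l := rfl

theorem P_nil (d1 d2 : PySem.Dict Int Int) : P d1 d2 [] = 0 := by
  rw [P]; simp

theorem P_concat (d1 d2 : PySem.Dict Int Int) (l : List (List Int)) (x : List Int) :
    P d1 d2 (l ++ [x]) =
      1 + P (d1.insert (f0 x) (d1.getD (f0 x) 0 - 1))
            (d2.insert (f1 x) (d2.getD (f1 x) 0 - 1))
            (l.filter (fun t => !cnd (d1.insert (f0 x) (d1.getD (f0 x) 0 - 1))
                                     (d2.insert (f1 x) (d2.getD (f1 x) 0 - 1)) t)) := by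
  rw [P, dif_neg (by simp)]
  simp

theorem bscan_eq (r : List (List Int)) :
    ∀ (d1 d2 : PySem.Dict Int Int) (fake : Int), InvC r.reverse d1 d2 →
      bscan d1 d2 fake r =
        fake + P d1 d2 (r.reverse.filter (fun t => !cnd d1 d2 t)) := by
  induction r with
  | nil => intro d1 d2 fake _; simp [bscan, P_nil]
  | cons x r' ih =>
      intro d1 d2 fake hInv
      have hxs : (x :: r').reverse = r'.reverse ++ [x] := by simp
      have hsub : InvC r'.reverse d1 d2 := by
        intro v
        have h1 := (hInv v).1
        have h2 := (hInv v).2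
        rw [hxs, List.countP_append] at h1 h2
        constructor <;> push_cast at h1 h2 ⊢ <;> omega
      simp only [bscan, f0_def, f1_def]
      by_cases hx : cnd d1 d2 x = true
      · rw [if_neg (by
          simp only [cnd, Bool.or_eq_true, beq_iff_eq] at hx
          intro hcontra
          rcases hx with h | h
          · exact hcontra.1 h
          · exact hcontra.2 h)]
        rw [ih d1 d2 fake hsub]
        have hfil : (x :: r').reverse.filter (fun t => !cnd d1 d2 t)
            = r'.reverse.filter (fun t => !cnd d1 d2 t) := by
          rw [hxs, List.filter_append]
          simp [hx]
        rw [hfil]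
      · have hxb : cnd d1 d2 x = false := eq_false_of_ne_true hx
        have hx12 : ¬ d1.getD (f0 x) 0 = 1 ∧ ¬ d2.getD (f1 x) 0 = 1 := by
          simpa [cnd] using hxb
        rw [if_pos ⟨hx12.1, hx12.2⟩]
        have hInv' : InvC r'.reverse
            (d1.insert (f0 x) (d1.getD (f0 x) 0 - 1))
            (d2.insert (f1 x) (d2.getD (f1 x) 0 - 1)) := by
          intro v
          have h1 := (hInv v).1
          have h2 := (hInv v).2
          rw [hxs, List.countP_append] at h1 h2
          constructor
          · rw [PySem.Dict.getD_insert]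
            by_cases hv : v = f0 x
            · rw [if_pos hv]
              subst hv
              have hx1 : List.countP (fun l => f0 l == f0 x) [x] = 1 := by simp
              rw [hx1] at h1
              push_cast at h1 ⊢
              omega
            · rw [if_neg hv]
              push_cast at h1 ⊢
              omega
          · rw [PySem.Dict.getD_insert]
            by_cases hv : v = f1 x
            · rw [if_pos hv]
              subst hv
              have hx1 : List.countP (fun l => f1 l == f1 x) [x] = 1 := by simp
              rw [hx1] at h2
              push_cast at h2 ⊢
              omega
            · rw [if_neg hv]
              push_cast at h2 ⊢
              omega
        rw [ih _ _ (fake + 1) hInv']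
        have hfreeze : ∀ y ∈ r'.reverse, cnd d1 d2 y = true →
            cnd (d1.insert (f0 x) (d1.getD (f0 x) 0 - 1))
                (d2.insert (f1 x) (d2.getD (f1 x) 0 - 1)) y = true := by
          intro y hy hcy
          simp only [cnd, Bool.or_eq_true, beq_iff_eq] at hcy ⊢
          rcases hcy with hc | hc
          · left
            have hne : f0 y ≠ f0 x := by
              intro he
              have h1 := (hInv (f0 y)).1
              rw [hxs, List.countP_append, hc] at h1
              have hy1 : 0 < r'.reverse.countP (fun l => f0 l == f0 y) :=
                List.countP_pos_iff.mpr ⟨y, hy, by simp⟩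
              have hx1 : List.countP (fun l => f0 l == f0 y) [x] = 1 := by simp [he]
              rw [hx1] at h1
              push_cast at h1
              omega
            rw [PySem.Dict.getD_insert, if_neg hne]
            exact hc
          · right
            have hne : f1 y ≠ f1 x := by
              intro he
              have h2 := (hInv (f1 y)).2
              rw [hxs, List.countP_append, hc] at h2
              have hy1 : 0 < r'.reverse.countP (fun l => f1 l == f1 y) :=
                List.countP_pos_iff.mpr ⟨y, hy, by simp⟩
              have hx1 : List.countP (fun l => f1 l == f1 y) [x] = 1 := by simp [he]
              rw [hx1] at h2
              push_cast at h2
              omega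
            rw [PySem.Dict.getD_insert, if_neg hne]
            exact hc
        have hff : (r'.reverse.filter (fun t => !cnd d1 d2 t)).filter
              (fun t => !cnd (d1.insert (f0 x) (d1.getD (f0 x) 0 - 1))
                            (d2.insert (f1 x) (d2.getD (f1 x) 0 - 1)) t)
            = r'.reverse.filter (fun t => !cnd (d1.insert (f0 x) (d1.getD (f0 x) 0 - 1))
                            (d2.insert (f1 x) (d2.getD (f1 x) 0 - 1)) t) := by
          rw [List.filter_filter]
          apply List.filter_congr
          intro y hy
          by_cases hcy : cnd d1 d2 y = true
          · simp [hfreeze y hy hcy, hcy]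
          · simp [eq_false_of_ne_true hcy]
        rw [hxs, List.filter_append]
        have hkeep : List.filter (fun t => !cnd d1 d2 t) [x] = [x] := by simp [hxb]
        rw [hkeep, P_concat, hff]
        ring

theorem getD_keyed_counter (key : List Int → Int) :
    ∀ (ls : List (List Int)) (d : PySem.Dict Int Int) (v : Int),
      (ls.foldl (fun d l => d.insert (key l) (d.getD (key l) 0 + 1)) d).getD v 0 =
        d.getD v 0 + (ls.countP (fun l => key l == v) : Int) := by
  intro ls
  induction ls with
  | nil => intro d v; simp
  | cons l rest ih =>
      intro d v
      simp only [List.foldl_cons, List.countP_cons]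
      rw [ih]
      by_cases hv : key l = v
      · rw [PySem.Dict.getD_insert]
        simp [hv]
        ring
      · rw [PySem.Dict.getD_insert]
        rw [if_neg (fun hh => hv hh.symm)]
        simp [(by simpa using hv : (key l == v) = false)]

theorem C1_getD (lists : List (List Int)) (v : Int) :
    (C1 lists).getD v 0 = (lists.countP (fun l => f0 l == v) : Int) := by
  rw [C1, getD_keyed_counter]
  simp

theorem C2_getD (lists : List (List Int)) (v : Int) :
    (C2 lists).getD v 0 = (lists.countP (fun l => f1 l == v) : Int) := by
  rw [C2, getD_keyed_counter]
  simp

theorem invC_init (lists : List (List Int)) : InvC lists (C1 lists) (C2 lists) := by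
  intro v
  rw [C1_getD, C2_getD]
  exact ⟨le_refl _, le_refl _⟩

-- ===== VERDICT (by name: the statement is the Claim_ definition above) =====
theorem solve_spec : Claim_equal_solve := by
  unfold Claim_equal_solve
  intro N lists _ _
  unfold Spec_solve
  simp only [solve, solve_alt]
  rw [buildA_eq, buildB_eq]
  have hscan := scanRemove_eq (C1 lists) (C2 lists) lists [] 0 (by simp)
  simp only [List.nil_append] at hscan
  rw [hscan]
  dsimp only
  rw [solveWhile_eq]
  have hInv : InvC (lists.reverse).reverse (C1 lists) (C2 lists) := by
    rw [List.reverse_reverse]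
    exact invC_init lists
  rw [bscan_eq lists.reverse (C1 lists) (C2 lists) 0 hInv]
  rw [List.reverse_reverse]
  have hsum : lists.countP (fun t => cnd (C1 lists) (C2 lists) t) +
      (lists.filter (fun t => !cnd (C1 lists) (C2 lists) t)).length = lists.length := by
    rw [← List.countP_eq_length_filter]
    have H : ∀ (p : List Int → Bool) (l : List (List Int)),
        l.countP p + l.countP (fun t => !p t) = l.length := by
      intro p l
      induction l with
      | nil => simp
      | cons y ys ihy => by_cases hy : p y <;> simp [hy] <;> omega
    exact H _ _
  omega
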